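-- pv_equiv track=rewrite | github.com/cnpem/MHCXGraph | MHCXGraph/scripts/renumber_MHCI_imgt.py | parse_imgt_label
-- ===== SOURCE A (Python) =====
-- def parse_imgt_label(label: str) -> tuple[int, str]:
--     label = str(label).strip()
--     if not label:
--         raise ValueError("Empty IMGT label")
--
--     i = 0
--     while i < len(label) and label[i].isdigit():
--         i += 1
--
--     if i == 0:
--         raise ValueError(f"Invalid IMGT label: {label}")
--
--     resseq = int(label[:i])
--     icode = label[i:] if i < len(label) else " "
--     if len(icode) > 1:
--         raise ValueError(f"Unsupported insertion code in label: {label}")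
--
--     return resseq, icode
-- ===== SOURCE B (Python) =====
-- def parse_imgt_label(label: str) -> tuple[int, str]:
--     # Right-to-left decomposition: decide the insertion code from the LAST
--     # character, then validate the remaining body as all-digits in one check.
--     label = str(label).strip()
--     if not label:
--         raise ValueError("Empty IMGT label")
--     if label[-1].isdigit():
--         body, icode = label, " "
--     else:
--         body, icode = label[:-1], label[-1]
--     if not body.isdigit():
--         raise ValueError(f"Invalid IMGT label: {label}")
--     return int(body), icode
-- ===== Notes on version B (the rewrite author's own statement) =====
-- stated objective: simpler
-- what changed: Instead of scanning a leading digit run left-to-right with an index loop and slicing around it, B inspects only the last character to pick the insertion code and validates the whole remaining body with one all-digits check (str.isdigit).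
-- outside the precondition, e.g. on parse_imgt_label('abc'): A raises ValueError, B raises ValueError; on parse_imgt_label('12AB'): A raises ValueError, B raises ValueError
import Mathlib
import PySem

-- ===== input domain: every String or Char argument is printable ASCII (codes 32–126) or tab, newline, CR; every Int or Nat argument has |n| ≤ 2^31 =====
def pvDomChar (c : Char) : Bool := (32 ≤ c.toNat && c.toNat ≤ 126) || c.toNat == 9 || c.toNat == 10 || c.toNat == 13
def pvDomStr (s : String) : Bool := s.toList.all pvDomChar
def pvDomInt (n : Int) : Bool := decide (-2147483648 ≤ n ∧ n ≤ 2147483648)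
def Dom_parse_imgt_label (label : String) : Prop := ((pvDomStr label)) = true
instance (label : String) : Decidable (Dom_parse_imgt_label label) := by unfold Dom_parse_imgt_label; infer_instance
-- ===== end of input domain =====

-- B decides the insertion code from the LAST character and validates the body with one
-- all-digits check, instead of A's left-to-right index scan of the leading digit run
-- (simpler); equivalence is proved on Pre_ (the inputs where A returns).

-- ===== PORT A =====
-- while i < len(label) and label[i].isdigit(): i += 1
def pvAWhile (cs : List Char) (i : Nat) : Nat :=
  if h : i < cs.length then
    if PySem.Chars.isdigit cs[i] then pvAWhile cs (i + 1) else i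
  else i
termination_by cs.length - i

def parse_imgt_label (label : String) : Int × String :=
  let cs := (PySem.Str.strip label).toList
  if cs.isEmpty then (0, "")            -- raise ValueError("Empty IMGT label"): outside Pre_
  else
    let i := pvAWhile cs 0
    if i = 0 then (0, "")               -- raise ValueError("Invalid IMGT label"): outside Pre_
    else
      let resseq := (PySem.Int.ofChars? (cs.take i)).getD 0   -- int(label[:i]); slice [:i], 0 ≤ i ≤ len, is take
      let icodeL := if i < cs.length then cs.drop i else [' ']  -- label[i:] if i < len else " "
      if icodeL.length > 1 then (0, "") -- raise ValueError("Unsupported insertion code"): outside Pre_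
      else (resseq, String.ofList icodeL)

-- ===== PORT B =====
-- label[-1].isdigit() on the nonempty stripped list is a test of the last character;
-- str.isdigit on the body = nonempty ∧ every char a digit (PySem.Chars.strIsdigit).
def parse_imgt_label_alt (label : String) : Int × String :=
  let cs := (PySem.Str.strip label).toList
  if cs.isEmpty then (0, "")            -- raise ValueError("Empty IMGT label"): outside Pre_
  else
    let p : List Char × String :=
      if PySem.Chars.isdigit (cs.getLast!) then (cs, " ")
      else (cs.dropLast, String.ofList [cs.getLast!])
    if ¬ PySem.Chars.strIsdigit p.1 then (0, "")   -- raise ValueError("Invalid IMGT label"): outside Pre_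
    else ((PySem.Int.ofChars? p.1).getD 0, p.2)

-- ===== PRECONDITION & SPEC =====
-- Pre_ excludes exactly the inputs where A raises ValueError: stripped label empty or
-- not starting with a digit, or more than one character after the leading digit run.
def Pre_parse_imgt_label (label : String) : Prop :=
  ((PySem.Str.strip label).toList.takeWhile PySem.Chars.isdigit) ≠ [] ∧
  ((PySem.Str.strip label).toList.dropWhile PySem.Chars.isdigit).length ≤ 1
instance (label : String) : Decidable (Pre_parse_imgt_label label) := by unfold Pre_parse_imgt_label; infer_instance

def pvWitness_parse_imgt_label : String := "12A"

def Spec_parse_imgt_label (label : String) (out : Int × String) : Prop := out = parse_imgt_label_alt label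
instance (label : String) (out : Int × String) : Decidable (Spec_parse_imgt_label label out) := by unfold Spec_parse_imgt_label; infer_instance

-- ===== CLAIM (what is proved, stated in full; the proofs are below) =====
def Claim_equal_parse_imgt_label : Prop := ∀ (label : String), Dom_parse_imgt_label label → Pre_parse_imgt_label label → Spec_parse_imgt_label label (parse_imgt_label label)

-- ===== LEMMAS AND PROOFS =====

-- A's while loop computes the length of the maximal digit run starting at i.
theorem pvAWhile_eq (cs : List Char) (i : Nat) :
    pvAWhile cs i = i + ((cs.drop i).takeWhile PySem.Chars.isdigit).length := by
  unfold pvAWhile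
  split
  · rename_i h
    rw [List.drop_eq_getElem_cons h, List.takeWhile]
    split
    · rename_i hd
      simp only [hd, List.length_cons]
      rw [pvAWhile_eq cs (i + 1)]
      omega
    · rename_i hd
      simp [hd]
  · rename_i h
    rw [List.drop_eq_nil_of_le (by omega)]
    simp
termination_by cs.length - i

-- the head of dropWhile fails the predicate
theorem pv_dropWhile_head_false {p : Char → Bool} {l r : List Char} {c : Char}
    (h : l.dropWhile p = c :: r) : p c = false := by
  induction l with
  | nil => simp at h
  | cons x xs ih =>
    rw [List.dropWhile_cons] at h
    split at h
    · exact ih h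
    · rename_i hx
      cases h
      simpa using hx

theorem pv_getLast!_concat (l : List Char) (c : Char) : (l ++ [c]).getLast! = c := by
  simp [List.getLast!_eq_getLast?_getD]

theorem pv_getLast!_mem (l : List Char) (h : l ≠ []) : l.getLast! ∈ l := by
  cases hgl : l.getLast? with
  | none => exact absurd (List.getLast?_eq_none_iff.mp hgl) h
  | some x =>
    obtain ⟨l', rfl⟩ := List.getLast?_eq_some_iff.mp hgl
    rw [pv_getLast!_concat]
    simp

-- ===== VERDICT (by name: the statement is the Claim_ definition above) =====
theorem parse_imgt_label_spec : Claim_equal_parse_imgt_label := by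
  intro label _dom pre
  obtain ⟨htw, hdw⟩ := pre
  unfold Spec_parse_imgt_label parse_imgt_label parse_imgt_label_alt
  set cs := (PySem.Str.strip label).toList with hcs
  set tw := cs.takeWhile PySem.Chars.isdigit with htwdef
  set dw := cs.dropWhile PySem.Chars.isdigit with hdwdef
  have hsplit : tw ++ dw = cs := List.takeWhile_append_dropWhile
  have hcs_ne : cs ≠ [] := by
    intro h
    apply htw
    rw [htwdef, h]
    rfl
  have htwdig : ∀ c ∈ tw, PySem.Chars.isdigit c = true := by
    intro c hc
    exact List.mem_takeWhile_imp (htwdef ▸ hc)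
  have htake : cs.take tw.length = tw := by
    conv_lhs => rw [← hsplit]
    simp
  have hdrop : cs.drop tw.length = dw := by
    conv_lhs => rw [← hsplit]
    simp
  have hlen : cs.length = tw.length + dw.length := by
    rw [← hsplit]; simp
  have hwhile : pvAWhile cs 0 = tw.length := by
    rw [pvAWhile_eq]; simp [htwdef]
  have htwlen : tw.length ≠ 0 := by simpa using htw
  have hne : cs.isEmpty = false := by simp [hcs_ne]
  have halltw : PySem.Chars.strIsdigit tw = true := by
    rw [PySem.Chars.strIsdigit]
    simp only [Bool.and_eq_true, List.all_eq_true]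
    exact ⟨by simpa using htw, fun d hd => htwdig d hd⟩
  simp only [hne, Bool.false_eq_true, if_false, hwhile, if_neg htwlen, htake, hdrop]
  by_cases hdwnil : dw = []
  · -- all digits: cs = tw, last char is a digit
    have hcseq : cs = tw := by rw [← hsplit, hdwnil, List.append_nil]
    have hlast : PySem.Chars.isdigit cs.getLast! = true :=
      htwdig _ (hcseq ▸ pv_getLast!_mem cs hcs_ne)
    have hsp : String.ofList [' '] = " " := rfl
    rw [hcseq] at hlast ⊢
    simp only [hlast, if_true, halltw, not_true, if_false,
      List.length_cons, List.length_nil, gt_iff_lt, Nat.lt_irrefl, hsp]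
  · -- dw = [c], c not a digit; cs = tw ++ [c]
    obtain ⟨c, hc⟩ : ∃ c, dw = [c] := by
      have h0 : dw.length ≠ 0 := by simpa using hdwnil
      exact List.length_eq_one_iff.mp (by omega)
    have hcdig : PySem.Chars.isdigit c = false :=
      pv_dropWhile_head_false (p := PySem.Chars.isdigit) (l := cs) (r := [])
        (by rw [← hdwdef, hc])
    have hcseq : cs = tw ++ [c] := by rw [← hsplit, hc]
    have hlast? : cs.getLast? = some c := by rw [hcseq]; simp
    have hl : tw.length < cs.length := by rw [hlen, hc]; simp
    rw [if_pos hl, hc]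
    have hdl : cs.dropLast = tw := by rw [hcseq]; simp
    simp [hlast?, hcdig, hdl, halltw]
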